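-- pv_equiv track=rewrite | github.com/tobixen/calendar-cli | calendar-cli.py | config_section
-- ===== SOURCE A (Python) =====
-- def config_section(config, section='default'):
--     if section in config and 'inherits' in config[section]:
--         ret = config_section(config, config[section]['inherits'])
--     else:
--         ret = {}
--     if section in config:
--         ret.update(config[section])
--     return ret
-- ===== SOURCE B (Python) =====
-- def config_section(config, section='default'):
--     # Collect the inheritance chain leaf-to-root, then fold updates root-first.
--     chain = []
--     s = section
--     while s in config and 'inherits' in config[s]:
--         chain.append(s)
--         s = config[s]['inherits']
--     chain.append(s)
--     ret = {}
--     for s in reversed(chain):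
--         if s in config:
--             ret.update(config[s])
--     return ret
-- ===== Notes on version B (the rewrite author's own statement) =====
-- stated objective: alternative
-- what changed: Replaces the recursion-then-update with an iterative pass that first collects the inheritance chain into a list and then folds dict.update over it in reverse (root ancestor first).
import Mathlib
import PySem

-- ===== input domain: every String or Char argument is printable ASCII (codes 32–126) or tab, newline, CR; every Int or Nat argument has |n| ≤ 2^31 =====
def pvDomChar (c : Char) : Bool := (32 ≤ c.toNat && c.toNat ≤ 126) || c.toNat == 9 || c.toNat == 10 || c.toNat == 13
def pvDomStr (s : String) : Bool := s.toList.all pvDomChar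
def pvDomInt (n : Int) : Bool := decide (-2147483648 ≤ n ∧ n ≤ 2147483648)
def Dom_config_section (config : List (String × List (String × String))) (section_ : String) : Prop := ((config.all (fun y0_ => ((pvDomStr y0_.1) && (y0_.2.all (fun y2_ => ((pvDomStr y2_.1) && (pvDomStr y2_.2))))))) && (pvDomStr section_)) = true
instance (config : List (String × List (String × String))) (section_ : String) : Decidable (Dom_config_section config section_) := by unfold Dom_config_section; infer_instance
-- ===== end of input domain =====

-- B replaces A's recursion-then-update by collecting the inheritance chain into a list and
-- folding dict.update over it root-first (alternative decomposition, same cost).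


-- shared one-line lookups: `section in config` / `config[s]` (first match) and `config[s]['inherits']`
def pvCfgGet (config : List (String × List (String × String))) (s : String) :
    Option (List (String × String)) := (PySem.Dict.mk config).get? s

def pvInherits (items : List (String × String)) : Option String :=
  (PySem.Dict.mk items).get? "inherits"

-- ===== PORT A =====
-- A's recursion, made total with a fuel guard (fuel config.length+1 suffices on every input
-- Pre_ admits; at fuel 0 the recursive branch is treated as the no-inherit base case).
def config_section_go (config : List (String × List (String × String))) :
    Nat → String → PySem.Dict String String
  | 0, s =>
      (match pvCfgGet config s with
       | some items => PySem.Dict.update PySem.Dict.empty items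
       | none => PySem.Dict.empty)
  | n + 1, s =>
      let ret : PySem.Dict String String :=
        match pvCfgGet config s with
        | some items =>
            match pvInherits items with
            | some parent => config_section_go config n parent
            | none => PySem.Dict.empty
        | none => PySem.Dict.empty
      match pvCfgGet config s with
      | some items => ret.update items
      | none => ret

def config_section (config : List (String × List (String × String))) (section_ : String) :
    List (String × String) :=
  (config_section_go config (config.length + 1) section_).items

-- ===== PORT B =====
-- the while loop: collect the chain leaf-to-root (same fuel guard for totality)
def pvChainGo (config : List (String × List (String × String))) :
    Nat → String → List String → List String
  | 0, s, acc => acc ++ [s]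
  | n + 1, s, acc =>
      match pvCfgGet config s with
      | some items =>
          match pvInherits items with
          | some parent => pvChainGo config n parent (acc ++ [s])
          | none => acc ++ [s]
      | none => acc ++ [s]

-- the body of B's `for s in reversed(chain)` loop
def pvStepB (config : List (String × List (String × String)))
    (d : PySem.Dict String String) (s : String) : PySem.Dict String String :=
  match pvCfgGet config s with
  | some items => d.update items
  | none => d

def config_section_alt (config : List (String × List (String × String))) (section_ : String) :
    List (String × String) :=
  let chain := pvChainGo config (config.length + 1) section_ []
  (chain.reverse.foldl (pvStepB config) PySem.Dict.empty).items

-- ===== PRECONDITION & SPEC =====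
-- one step of the inherits relation, and whether a section still has a parent to follow
def pvHasParent (config : List (String × List (String × String))) (s : String) : Bool :=
  match pvCfgGet config s with
  | some items => (pvInherits items).isSome
  | none => false

def pvParent (config : List (String × List (String × String))) (s : String) : String :=
  match pvCfgGet config s with
  | some items => (pvInherits items).getD s
  | none => s

-- Pre_ excludes exactly the cyclic inherits chains, on which Python A raises RecursionError
-- (an acyclic chain leaves the has-parent set within config.length steps).
def Pre_config_section (config : List (String × List (String × String))) (section_ : String) : Prop :=
  ((List.range (config.length + 1)).any
    (fun i => ! pvHasParent config ((pvParent config)^[i] section_))) = true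
instance (config : List (String × List (String × String))) (section_ : String) : Decidable (Pre_config_section config section_) := by unfold Pre_config_section; infer_instance

def pvWitness_config_section : (List (String × List (String × String))) × String :=
  ([("default", [("a", "1")]), ("work", [("inherits", "default"), ("b", "2")])], "work")

def Spec_config_section (config : List (String × List (String × String))) (section_ : String) (out : List (String × String)) : Prop := out = config_section_alt config section_
instance (config : List (String × List (String × String))) (section_ : String) (out : List (String × String)) : Decidable (Spec_config_section config section_ out) := by unfold Spec_config_section; infer_instance

-- ===== CLAIM (what is proved, stated in full; the proofs are below) =====
def Claim_equal_config_section : Prop := ∀ (config : List (String × List (String × String))) (section_ : String), Dom_config_section config section_ → Pre_config_section config section_ → Spec_config_section config section_ (config_section config section_)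

-- ===== LEMMAS AND PROOFS =====

theorem pvChainGo_acc (config : List (String × List (String × String))) (n : Nat) :
    ∀ (s : String) (acc : List String),
      pvChainGo config n s acc = acc ++ pvChainGo config n s [] := by
  induction n with
  | zero => intro s acc; simp [pvChainGo]
  | succ n ih =>
      intro s acc
      simp only [pvChainGo]
      cases pvCfgGet config s with
      | none => simp
      | some items =>
          cases hi : pvInherits items with
          | none => simp [hi]
          | some parent =>
              simp only [hi, List.nil_append]
              rw [ih parent (acc ++ [s]), ih parent [s]]
              simp

theorem go_eq_fold (config : List (String × List (String × String))) (n : Nat) :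
    ∀ s : String,
      config_section_go config n s =
        ((pvChainGo config n s []).reverse.foldl (pvStepB config) PySem.Dict.empty) := by
  induction n with
  | zero =>
      intro s
      simp only [config_section_go, pvChainGo, List.nil_append, List.reverse_singleton,
        List.foldl_cons, List.foldl_nil, pvStepB]
  | succ n ih =>
      intro s
      simp only [config_section_go, pvChainGo, List.nil_append]
      cases hc : pvCfgGet config s with
      | none => simp [pvStepB, hc]
      | some items =>
          cases hi : pvInherits items with
          | none => simp [pvStepB, hc, hi]
          | some parent =>
              simp only [hi]
              rw [pvChainGo_acc config n parent [s]]
              simp only [List.reverse_append, List.reverse_singleton, List.singleton_append,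
                List.reverse_nil, List.nil_append, List.foldl_append, List.foldl_cons,
                List.foldl_nil]
              rw [ih parent]
              simp [pvStepB, hc]

-- ===== VERDICT (by name: the statement is the Claim_ definition above) =====
theorem config_section_spec : Claim_equal_config_section := by
  intro config section_ _ _
  unfold Spec_config_section config_section config_section_alt
  rw [go_eq_fold]
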